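-- pv_equiv track=rewrite | github.com/yf-svg/VirtualMouse | app/gestures/validation.py | _remaining_label_union_by_user_order
-- ===== SOURCE A (Python) =====
-- def _remaining_label_union_by_user_order(
--     ordered_users: list[str],
--     label_counts: dict[str, dict[str, int]],
-- ) -> list[set[str]]:
--     unions: list[set[str]] = [set() for _ in range(len(ordered_users) + 1)]
--     for idx in range(len(ordered_users) - 1, -1, -1):
--         unions[idx] = set(unions[idx + 1]) | set(label_counts[ordered_users[idx]])
--     return unions
-- ===== SOURCE B (Python) =====
-- def _remaining_label_union_by_user_order(
--     ordered_users: list[str],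
--     label_counts: dict[str, dict[str, int]],
-- ) -> list[set[str]]:
--     def suffix_union(users: list[str]) -> set[str]:
--         acc: set[str] = set()
--         for user in reversed(users):
--             acc |= set(label_counts[user])
--         return acc
--
--     return [suffix_union(ordered_users[i:]) for i in range(len(ordered_users) + 1)]
-- ===== Notes on version B (the rewrite author's own statement) =====
-- stated objective: alternative
-- what changed: Replaces A's single backward pass that reuses unions[idx+1] with an independent per-index computation: each entry is a fresh fold of set-unions over the reversed suffix ordered_users[i:], trading speed (O(n^2*L) vs O(n*L)) for a direct definitional form.
import Mathlib
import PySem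

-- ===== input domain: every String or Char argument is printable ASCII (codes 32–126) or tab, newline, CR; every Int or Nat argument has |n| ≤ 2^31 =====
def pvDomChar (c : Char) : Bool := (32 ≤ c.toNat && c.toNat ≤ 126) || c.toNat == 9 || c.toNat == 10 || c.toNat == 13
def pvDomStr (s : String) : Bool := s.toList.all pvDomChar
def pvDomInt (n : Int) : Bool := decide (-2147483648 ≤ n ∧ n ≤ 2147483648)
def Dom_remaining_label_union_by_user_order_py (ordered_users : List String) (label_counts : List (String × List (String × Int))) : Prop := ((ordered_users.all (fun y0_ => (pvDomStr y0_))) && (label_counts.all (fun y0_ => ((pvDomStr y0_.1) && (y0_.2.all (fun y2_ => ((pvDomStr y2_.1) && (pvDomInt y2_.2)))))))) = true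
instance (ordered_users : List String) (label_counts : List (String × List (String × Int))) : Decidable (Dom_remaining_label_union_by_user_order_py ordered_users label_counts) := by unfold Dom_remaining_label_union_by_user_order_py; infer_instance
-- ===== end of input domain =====

-- B computes each suffix union independently (one fold over every suffix, O(n^2))
-- instead of A's single backward pass that reuses the previous entry; same return value.


-- ===== PORT A =====
-- set(label_counts[u]) : keys of the inner dict, deduplicated in order
def pvLabelKeys (label_counts : List (String × List (String × Int))) (user : String) : List String :=
  PySem.Set.ofList (((PySem.Dict.mk label_counts).getD user []).map Prod.fst)

def remaining_label_union_by_user_order_py (ordered_users : List String) (label_counts : List (String × List (String × Int))) : List (List String) :=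
  let unions : List (List String) := List.replicate (ordered_users.length + 1) []
  (PySem.List.pyRange ((ordered_users.length : Int) - 1) (-1) (-1)).foldl
    (fun uns idx =>
      PySem.List.pySetD uns idx
        (PySem.Set.union
          (PySem.Set.ofList (PySem.List.pyGetD uns (idx + 1) []))
          (pvLabelKeys label_counts (PySem.List.pyGetD ordered_users idx ""))))
    unions

-- ===== PORT B =====
-- B's helper suffix_union: fold |= over the reversed user list, starting from set()
def pvSuffixUnion (label_counts : List (String × List (String × Int))) (users : List String) : List String :=
  users.reverse.foldl
    (fun acc user => PySem.Set.union acc (pvLabelKeys label_counts user))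
    PySem.Set.empty

def remaining_label_union_by_user_order_py_alt (ordered_users : List String) (label_counts : List (String × List (String × Int))) : List (List String) :=
  (PySem.List.pyRange 0 ((ordered_users.length : Int) + 1) 1).map
    (fun i => pvSuffixUnion label_counts (PySem.List.slice ordered_users (some i) none))

-- ===== PRECONDITION & SPEC =====
-- A raises KeyError when some user of ordered_users is not a key of label_counts; Pre_ excludes exactly that.
def Pre_remaining_label_union_by_user_order_py (ordered_users : List String) (label_counts : List (String × List (String × Int))) : Prop :=
  ∀ u ∈ ordered_users, u ∈ label_counts.map Prod.fst
instance (ordered_users : List String) (label_counts : List (String × List (String × Int))) : Decidable (Pre_remaining_label_union_by_user_order_py ordered_users label_counts) := by unfold Pre_remaining_label_union_by_user_order_py; infer_instance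

def pvWitness_remaining_label_union_by_user_order_py : List String × (List (String × List (String × Int))) :=
  (["a", "b"], [("a", [("x", 1), ("y", 2)]), ("b", [("y", 1)])])

def Spec_remaining_label_union_by_user_order_py (ordered_users : List String) (label_counts : List (String × List (String × Int))) (out : List (List String)) : Prop := out = remaining_label_union_by_user_order_py_alt ordered_users label_counts
instance (ordered_users : List String) (label_counts : List (String × List (String × Int))) (out : List (List String)) : Decidable (Spec_remaining_label_union_by_user_order_py ordered_users label_counts out) := by unfold Spec_remaining_label_union_by_user_order_py; infer_instance

-- ===== CLAIM (what is proved, stated in full; the proofs are below) =====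
def Claim_equal_remaining_label_union_by_user_order_py : Prop := ∀ (ordered_users : List String) (label_counts : List (String × List (String × Int))), Dom_remaining_label_union_by_user_order_py ordered_users label_counts → Pre_remaining_label_union_by_user_order_py ordered_users label_counts → Spec_remaining_label_union_by_user_order_py ordered_users label_counts (remaining_label_union_by_user_order_py ordered_users label_counts)

-- ===== LEMMAS AND PROOFS =====

theorem pvSuffixUnion_nodup (lc : List (String × List (String × Int))) (l : List String) :
    (pvSuffixUnion lc l).Nodup := by
  unfold pvSuffixUnion
  generalize l.reverse = r
  suffices h : ∀ (acc : PySem.Set String), acc.Nodup →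
      (r.foldl (fun acc user => PySem.Set.union acc (pvLabelKeys lc user)) acc).Nodup by
    exact h PySem.Set.empty (by simp [PySem.Set.empty])
  induction r with
  | nil => intro acc h; simpa using h
  | cons x xs ih =>
    intro acc h
    exact ih _ (PySem.Set.nodup_union _ _ h)

theorem pvSuffixUnion_step (lc : List (String × List (String × Int))) (u : String) (l : List String) :
    pvSuffixUnion lc (u :: l) = PySem.Set.union (pvSuffixUnion lc l) (pvLabelKeys lc u) := by
  unfold pvSuffixUnion
  simp [List.foldl_append]

-- the intermediate state of A's backward loop after processing indices n-1 … j
def pvState (ordered_users : List String) (lc : List (String × List (String × Int))) (j : Nat) : List (List String) :=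
  (List.range (ordered_users.length + 1)).map
    (fun i => if j ≤ i then pvSuffixUnion lc (ordered_users.drop i) else [])

theorem pvState_length (ou : List String) (lc : List (String × List (String × Int))) (j : Nat) :
    (pvState ou lc j).length = ou.length + 1 := by
  simp [pvState]

theorem pvStep_state (ou : List String) (lc : List (String × List (String × Int))) (j : Nat)
    (hj : j < ou.length) :
    PySem.List.pySetD (pvState ou lc (j + 1)) (j : Int)
      (PySem.Set.union
        (PySem.Set.ofList (PySem.List.pyGetD (pvState ou lc (j + 1)) ((j : Int) + 1) []))
        (pvLabelKeys lc (PySem.List.pyGetD ou (j : Int) ""))) = pvState ou lc j := by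
  have hget : PySem.List.pyGetD (pvState ou lc (j + 1)) ((j : Int) + 1) []
      = pvSuffixUnion lc (ou.drop (j + 1)) := by
    have : ((j : Int) + 1) = ((j + 1 : Nat) : Int) := by push_cast; ring
    rw [this, PySem.List.pyGetD_natCast]
    have hlen : j + 1 < (pvState ou lc (j + 1)).length := by rw [pvState_length]; omega
    rw [List.getD_eq_getElem _ _ hlen]
    simp [pvState]
  have hu : PySem.List.pyGetD ou (j : Int) "" = ou[j] := by
    rw [PySem.List.pyGetD_natCast, List.getD_eq_getElem _ _ hj]
  rw [hget, hu, PySem.Set.ofList_eq_self_of_nodup _ (pvSuffixUnion_nodup lc _)]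
  have hdrop : ou.drop j = ou[j] :: ou.drop (j + 1) := List.drop_eq_getElem_cons hj
  have hS : PySem.Set.union (pvSuffixUnion lc (ou.drop (j + 1))) (pvLabelKeys lc ou[j])
      = pvSuffixUnion lc (ou.drop j) := by
    rw [hdrop, pvSuffixUnion_step]
  rw [hS, PySem.List.pySetD_natCast]
  apply List.ext_getElem
  · simp [pvState]
  · intro i h1 h2
    have hi : i < ou.length + 1 := by
      simpa [pvState] using h2
    rw [List.getElem_set]
    simp only [pvState, List.getElem_map, List.getElem_range]
    split_ifs with e h3 h4 h5
    all_goals (try subst e)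
    all_goals first | rfl | omega

theorem pvLoop (ou : List String) (lc : List (String × List (String × Int))) :
    ∀ (j : Nat), j ≤ ou.length →
      (PySem.List.pyRange ((j : Int) - 1) (-1) (-1)).foldl
        (fun uns idx =>
          PySem.List.pySetD uns idx
            (PySem.Set.union
              (PySem.Set.ofList (PySem.List.pyGetD uns (idx + 1) []))
              (pvLabelKeys lc (PySem.List.pyGetD ou idx ""))))
        (pvState ou lc j) = pvState ou lc 0 := by
  intro j
  induction j with
  | zero =>
    intro _
    rw [PySem.List.pyRange_neg_one_eq_nil (by norm_num)]
    rfl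
  | succ j ih =>
    intro hj
    have h1 : ((j + 1 : Nat) : Int) - 1 = (j : Nat) := by push_cast; ring
    rw [h1, PySem.List.pyRange_neg_one_cons (by omega)]
    simp only [List.foldl_cons]
    rw [pvStep_state ou lc j (by omega)]
    exact ih (by omega)

theorem pvState_top (ou : List String) (lc : List (String × List (String × Int))) :
    List.replicate (ou.length + 1) ([] : List String) = pvState ou lc ou.length := by
  apply List.ext_getElem
  · simp [pvState]
  · intro i h1 h2
    have hi : i < ou.length + 1 := by simpa using h1
    simp only [pvState, List.getElem_replicate, List.getElem_map, List.getElem_range]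
    split_ifs with h
    · have : i = ou.length := by omega
      subst this
      simp [pvSuffixUnion, PySem.Set.empty]
    · rfl

theorem pvAlt_eq_state (ou : List String) (lc : List (String × List (String × Int))) :
    remaining_label_union_by_user_order_py_alt ou lc = pvState ou lc 0 := by
  unfold remaining_label_union_by_user_order_py_alt pvState
  have h : ((ou.length : Int) + 1) = ((ou.length + 1 : Nat) : Int) := by push_cast; ring
  rw [h, PySem.List.pyRange_zero_natCast, List.map_map]
  apply List.map_congr_left
  intro k _
  simp [Function.comp, PySem.List.slice_from_natCast]

-- ===== VERDICT (by name: the statement is the Claim_ definition above) =====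
theorem remaining_label_union_by_user_order_py_spec : Claim_equal_remaining_label_union_by_user_order_py := by
  intro ou lc _ _
  show remaining_label_union_by_user_order_py ou lc = remaining_label_union_by_user_order_py_alt ou lc
  unfold remaining_label_union_by_user_order_py
  rw [pvAlt_eq_state]
  simp only []
  rw [pvState_top ou lc]
  exact pvLoop ou lc ou.length (le_refl _)
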